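-- pv_equiv track=rewrite | github.com/ssafy6-nathan/algorithm-study | study/2022/22.09.20/EJH/k진수에서 소수 개수 구하기.py | change_num
-- ===== SOURCE A (Python) =====
-- def change_num(n, k):
--     num = 0
--     s = 1
--     P = []
--     while n > 0:
--         num += (n % k) * s
--         if n % k == 0:
--             if num != 0:
--                 P.append(num)
--             s = 1
--             num = 0
--         else:
--             s *= 10
--         n //= k
--
--     if num != 0:
--         P.append(num)
--
--     return P
-- ===== SOURCE B (Python) =====
-- def change_num(n, k):
--     # Phase 1: extract all base-k digits, least-significant first.
--     digits = []
--     while n > 0: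
--         digits.append(n % k)
--         n //= k
--     # Phase 2: group maximal runs of nonzero digits; each run's value is
--     # its digits folded with factor 10 (most-significant digit first).
--     out = []
--     run = []
--     for d in digits:
--         if d != 0:
--             run = [d] + run
--         elif run:
--             v = 0
--             for x in run:
--                 v = v * 10 + x
--             out.append(v)
--             run = []
--     if run:
--         v = 0
--         for x in run:
--             v = v * 10 + x
--         out.append(v)
--     return out
-- ===== Notes on version B (the rewrite author's own statement) =====
-- stated objective: alternative
-- what changed: B first extracts the whole base-k digit list, then groups maximal runs of nonzero digits and folds each run with v*10+d, instead of A's single loop maintaining a running value num and a power-of-ten place accumulator s.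
import Mathlib
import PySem

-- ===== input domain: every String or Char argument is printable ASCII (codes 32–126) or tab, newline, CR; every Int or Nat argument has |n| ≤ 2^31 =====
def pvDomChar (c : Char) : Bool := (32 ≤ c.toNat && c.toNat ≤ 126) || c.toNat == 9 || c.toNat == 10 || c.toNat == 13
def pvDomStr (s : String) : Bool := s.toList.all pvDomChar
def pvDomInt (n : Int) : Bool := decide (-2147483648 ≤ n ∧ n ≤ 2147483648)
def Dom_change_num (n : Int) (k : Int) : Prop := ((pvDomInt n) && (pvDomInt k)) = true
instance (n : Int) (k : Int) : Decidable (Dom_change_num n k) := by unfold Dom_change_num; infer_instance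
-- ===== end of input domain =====

-- B replaces A's inline num/s place-value accumulators by digit extraction followed by grouping nonzero runs (alternative decomposition, same cost).

-- ===== PORT A =====
-- fuel n.toNat bounds the while loop; inside Pre_ it never runs out (n strictly decreases for k ≥ 2, and for k ≤ -1 the loop stops after one step)
def change_num_loop : Nat → Int → Int → Int → Int → List Int → List Int × Int
  | 0, _, _, num, _, P => (P, num)
  | fuel+1, n, k, num, s, P =>
    if n > 0 then
      let num' := num + (PySem.Int.mod n k) * s
      if PySem.Int.mod n k = 0 then
        change_num_loop fuel (PySem.Int.floordiv n k) k 0 1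
          (if num' ≠ 0 then P ++ [num'] else P)
      else
        change_num_loop fuel (PySem.Int.floordiv n k) k num' (s * 10) P
    else (P, num)

def change_num (n : Int) (k : Int) : List Int :=
  let r := change_num_loop n.toNat n k 0 1 []
  if r.2 ≠ 0 then r.1 ++ [r.2] else r.1

-- ===== PORT B =====
def change_num_alt_digits : Nat → Int → Int → List Int → List Int
  | 0, _, _, acc => acc
  | fuel+1, n, k, acc =>
    if n > 0 then
      change_num_alt_digits fuel (PySem.Int.floordiv n k) k (acc ++ [PySem.Int.mod n k])
    else acc

def change_num_alt_runval (run : List Int) : Int :=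
  run.foldl (fun v d => v * 10 + d) 0

def change_num_alt_group : List Int → List Int → List Int → List Int
  | [], out, run => if run ≠ [] then out ++ [change_num_alt_runval run] else out
  | d :: ds, out, run =>
    if d ≠ 0 then change_num_alt_group ds out ([d] ++ run)
    else if run ≠ [] then change_num_alt_group ds (out ++ [change_num_alt_runval run]) []
    else change_num_alt_group ds out []

def change_num_alt (n : Int) (k : Int) : List Int :=
  change_num_alt_group (change_num_alt_digits n.toNat n k []) [] []

-- ===== PRECONDITION & SPEC =====
-- Pre_ excludes only inputs where A never returns: k = 0 with n > 0 raises ZeroDivisionError, k = 1 with n > 0 loops forever.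
def Pre_change_num (n : Int) (k : Int) : Prop := n ≤ 0 ∨ (k ≠ 0 ∧ k ≠ 1)
instance (n : Int) (k : Int) : Decidable (Pre_change_num n k) := by unfold Pre_change_num; infer_instance

def pvWitness_change_num : Int × Int := (437, 3)

def Spec_change_num (n : Int) (k : Int) (out : List Int) : Prop := out = change_num_alt n k
instance (n : Int) (k : Int) (out : List Int) : Decidable (Spec_change_num n k out) := by unfold Spec_change_num; infer_instance

-- ===== CLAIM (what is proved, stated in full; the proofs are below) =====
def Claim_equal_change_num : Prop := ∀ (n : Int) (k : Int), Dom_change_num n k → Pre_change_num n k → Spec_change_num n k (change_num n k)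

-- ===== LEMMAS AND PROOFS =====

-- proof helper: the trailing 'if num != 0: P.append(num)' of A, as a function of the loop result
def change_num_fin (r : List Int × Int) : List Int :=
  if r.2 ≠ 0 then r.1 ++ [r.2] else r.1

lemma change_num_loop_stop (f : Nat) (n k num s : Int) (P : List Int) (hn : n ≤ 0) :
    change_num_loop f n k num s P = (P, num) := by
  cases f with
  | zero => rfl
  | succ f => simp [change_num_loop, show ¬ n > 0 by omega]

lemma change_num_alt_digits_stop (f : Nat) (n k : Int) (acc : List Int) (hn : n ≤ 0) :
    change_num_alt_digits f n k acc = acc := by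
  cases f with
  | zero => rfl
  | succ f => simp [change_num_alt_digits, show ¬ n > 0 by omega]

lemma change_num_alt_digits_acc (f : Nat) :
    ∀ (n k : Int) (acc : List Int),
    change_num_alt_digits f n k acc = acc ++ change_num_alt_digits f n k [] := by
  induction f with
  | zero => simp [change_num_alt_digits]
  | succ f ih =>
    intro n k acc
    by_cases h : n > 0
    · simp only [change_num_alt_digits, if_pos h]
      rw [ih _ _ (acc ++ _), ih _ _ ([] ++ _)]
      simp
    · simp [change_num_alt_digits, h]

lemma runval_scale (l : List Int) : ∀ v : Int,
    l.foldl (fun v d => v * 10 + d) v = v * 10 ^ l.length + change_num_alt_runval l := by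
  induction l with
  | nil => intro v; simp [change_num_alt_runval]
  | cons a l ih =>
    intro v
    simp only [change_num_alt_runval, List.foldl, List.length_cons]
    rw [ih (v * 10 + a), ih (0 * 10 + a), pow_succ]
    ring

lemma runval_cons (d : Int) (run : List Int) :
    change_num_alt_runval (d :: run) = d * 10 ^ run.length + change_num_alt_runval run := by
  have h := runval_scale run d
  simp only [change_num_alt_runval, List.foldl]
  rw [show (0 : Int) * 10 + d = d by ring, h]
  rfl

lemma runval_mono (l : List Int) : ∀ v : Int, 0 ≤ v → (∀ d ∈ l, 0 ≤ d) →
    v ≤ l.foldl (fun v d => v * 10 + d) v := by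
  induction l with
  | nil => intro v _ _; simp
  | cons a l ih =>
    intro v hv hd
    have ha : 0 ≤ a := hd a (by simp)
    have h1 : v ≤ v * 10 + a := by nlinarith
    calc v ≤ v * 10 + a := h1
      _ ≤ (a :: l).foldl (fun v d => v * 10 + d) v := by
          simpa using ih (v * 10 + a) (by omega) (fun d hdm => hd d (by simp [hdm]))

lemma runval_nil : change_num_alt_runval [] = 0 := rfl

lemma runval_pos (run : List Int) (hne : run ≠ []) (hd : ∀ d ∈ run, 1 ≤ d) :
    0 < change_num_alt_runval run := by
  cases run with
  | nil => exact absurd rfl hne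
  | cons a l =>
    have ha : 1 ≤ a := hd a (by simp)
    have hm := runval_mono l a (by omega) (fun d hdm => by have := hd d (by simp [hdm]); omega)
    simp only [change_num_alt_runval, List.foldl]
    rw [show (0 : Int) * 10 + a = a by ring]
    omega

-- A's flush test 'num != 0' agrees with B's 'run != []' when all run digits are ≥ 1
lemma flush_eq (run out : List Int) (hd : ∀ d ∈ run, 1 ≤ d) :
    (if change_num_alt_runval run ≠ 0 then out ++ [change_num_alt_runval run] else out)
    = (if run ≠ [] then out ++ [change_num_alt_runval run] else out) := by
  by_cases h : run = []
  · simp [h, runval_nil]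
  · have hp := runval_pos run h hd
    rw [if_pos (by omega : change_num_alt_runval run ≠ 0), if_pos h]

-- main invariant lemma for k ≥ 2: A's loop with accumulated (num, s) equals B's grouping
lemma main_pos (k : Int) (hk : 2 ≤ k) : ∀ fuel : Nat, ∀ (n : Int) (run out : List Int),
    n.toNat ≤ fuel → (∀ d ∈ run, 1 ≤ d) →
    change_num_fin (change_num_loop fuel n k (change_num_alt_runval run) (10 ^ run.length) out)
    = change_num_alt_group (change_num_alt_digits fuel n k []) out run := by
  intro fuel
  induction fuel with
  | zero =>
    intro n run out _ hrun
    simp only [change_num_loop, change_num_alt_digits, change_num_alt_group, change_num_fin]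
    exact flush_eq run out hrun
  | succ f ih =>
    intro n run out hfuel hrun
    by_cases hn : n > 0
    · have hd0 : 0 ≤ PySem.Int.mod n k := PySem.Int.mod_nonneg _ (by omega)
      have hlt : PySem.Int.floordiv n k < n :=
        (PySem.Int.floordiv_lt_iff_lt_mul (by omega)).mpr (by nlinarith)
      have hfuel' : (PySem.Int.floordiv n k).toNat ≤ f := by omega
      simp only [change_num_alt_digits, if_pos hn]
      rw [change_num_alt_digits_acc]
      simp only [List.nil_append, List.singleton_append]
      by_cases hz : PySem.Int.mod n k = 0
      · -- digit 0: A flushes num if nonzero; B flushes run if nonempty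
        simp only [change_num_loop, if_pos hn, hz, zero_mul, add_zero]
        rw [flush_eq run out hrun]
        simp only [change_num_alt_group, ne_eq, not_true_eq_false, if_false]
        by_cases hre : run = []
        · have h1 := ih (PySem.Int.floordiv n k) [] out hfuel' (by simp)
          simp only [runval_nil, List.length_nil, pow_zero] at h1
          simp [hre, h1]
        · have h1 := ih (PySem.Int.floordiv n k) []
            (out ++ [change_num_alt_runval run]) hfuel' (by simp)
          simp only [runval_nil, List.length_nil, pow_zero] at h1
          simp [hre, h1]
      · -- nonzero digit: push it onto the run
        have hd1 : 1 ≤ PySem.Int.mod n k := by omega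
        simp only [change_num_loop, if_pos hn, if_neg hz]
        have h1 := ih (PySem.Int.floordiv n k) (PySem.Int.mod n k :: run) out hfuel'
          (by intro d hdm
              rcases List.mem_cons.1 hdm with h | h
              · exact h ▸ hd1
              · exact hrun d h)
        rw [runval_cons, List.length_cons, pow_succ] at h1
        rw [show change_num_alt_runval run + PySem.Int.mod n k * 10 ^ run.length
              = PySem.Int.mod n k * 10 ^ run.length + change_num_alt_runval run by ring]
        rw [h1]
        simp [change_num_alt_group, hz]
    · -- loop does not run
      rw [change_num_loop_stop _ _ _ _ _ _ (by omega),
          change_num_alt_digits_stop _ _ _ _ (by omega)]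
      simp only [change_num_alt_group, change_num_fin]
      exact flush_eq run out hrun

lemma floordiv_neg_of_pos_of_neg (n k : Int) (hn : 0 < n) (hk : k ≤ -1) :
    PySem.Int.floordiv n k ≤ -1 := by
  have h := PySem.Int.floordiv_mul_add_mod n k
  have hb := PySem.Int.mod_neg_bounds n (by omega : k < 0)
  set q := PySem.Int.floordiv n k with hq
  by_contra hc
  have hq0 : 0 ≤ q := by omega
  nlinarith

-- ===== VERDICT (by name: the statement is the Claim_ definition above) =====
theorem change_num_spec : Claim_equal_change_num := by
  intro n k _ hpre
  unfold Spec_change_num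
  by_cases hn : n ≤ 0
  · have h0 : n.toNat = 0 := by omega
    simp [change_num, change_num_alt, h0, change_num_loop, change_num_alt_digits,
          change_num_alt_group]
  · have hn : 0 < n := by omega
    rcases hpre with h | ⟨hk0, hk1⟩
    · omega
    by_cases hk2 : 2 ≤ k
    · -- k ≥ 2: use the invariant lemma with the empty run
      have h := main_pos k hk2 n.toNat n [] [] (le_refl _) (by simp)
      simp only [runval_nil, List.length_nil, pow_zero] at h
      simpa only [change_num, change_num_alt, change_num_fin] using h
    · -- k ≤ -1: the loop runs exactly once, then n // k ≤ -1 stops it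
      have hkneg : k ≤ -1 := by omega
      obtain ⟨m, hm⟩ : ∃ m, n.toNat = m + 1 := ⟨n.toNat - 1, by omega⟩
      have hnext : PySem.Int.floordiv n k ≤ -1 := floordiv_neg_of_pos_of_neg n k hn hkneg
      simp only [change_num, change_num_alt, hm]
      simp only [change_num_loop, change_num_alt_digits, if_pos hn, List.nil_append]
      rw [change_num_alt_digits_stop _ _ _ _ (by omega)]
      by_cases hz : PySem.Int.mod n k = 0
      · simp only [hz, zero_mul, add_zero]
        rw [change_num_loop_stop _ _ _ _ _ _ (by omega)]
        simp [change_num_alt_group]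
      · rw [if_neg hz]
        rw [change_num_loop_stop _ _ _ _ _ _ (by omega)]
        simp [change_num_alt_group, hz, change_num_alt_runval]
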